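-- pv_equiv track=rewrite | github.com/hivdb/ngs-alignment-pipeline | sam_analyses.py | attach_initref_pos
-- ===== SOURCE A (Python) =====
-- def attach_initref_pos(alnprofile):
--     result = []
--     pos0 = -1
--     for p in alnprofile:
--         if p != '+':
--             pos0 += 1
--         result.append((pos0, p))
--     return result
-- ===== SOURCE B (Python) =====
-- def _go(seg):
--     # returns (positions for seg as if the counter started at -1, non-'+' count of seg)
--     if len(seg) == 1:
--         p = seg[0]
--         inc = 0 if p == '+' else 1
--         return [(inc - 1, p)], inc
--     mid = len(seg) // 2
--     L, cl = _go(seg[:mid])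
--     R, cr = _go(seg[mid:])
--     return L + [(pos + cl, q) for pos, q in R], cl + cr
--
--
-- def attach_initref_pos(alnprofile):
--     # Divide and conquer: solve halves independently, shift the right half
--     # by the left half's non-'+' count, concatenate.
--     if not alnprofile:
--         return []
--     return _go(alnprofile)[0]
-- ===== Notes on version B (the rewrite author's own statement) =====
-- stated objective: alternative
-- what changed: Replaces the sequential running-counter loop with a divide-and-conquer recursion: each half is tagged independently with a counter starting at -1 and the right half's positions are shifted by the left half's non-'+' count before concatenation.
import Mathlib
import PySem

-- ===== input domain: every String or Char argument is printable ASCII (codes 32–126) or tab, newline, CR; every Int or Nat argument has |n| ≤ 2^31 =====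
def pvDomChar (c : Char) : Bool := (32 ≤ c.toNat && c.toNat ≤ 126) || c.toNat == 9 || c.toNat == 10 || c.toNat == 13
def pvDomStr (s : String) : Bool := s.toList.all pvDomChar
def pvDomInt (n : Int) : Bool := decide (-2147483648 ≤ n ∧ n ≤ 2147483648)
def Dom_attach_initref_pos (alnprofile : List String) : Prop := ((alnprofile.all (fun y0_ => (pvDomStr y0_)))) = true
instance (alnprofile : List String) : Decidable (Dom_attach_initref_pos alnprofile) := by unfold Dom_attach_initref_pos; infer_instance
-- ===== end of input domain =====

-- B replaces A's sequential running-counter loop with a divide-and-conquer recursion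
-- (halves solved independently, right half shifted); alternative algorithm, similar cost.

-- ===== PORT A =====
-- running counter, appending (pos0, p) each step
def attach_initref_pos (alnprofile : List String) : List (Int × String) :=
  (alnprofile.foldl
    (fun (st : List (Int × String) × Int) p =>
      let pos0 : Int := if p ≠ "+" then st.2 + 1 else st.2
      (st.1 ++ [(pos0, p)], pos0))
    ([], -1)).1

-- ===== PORT B =====
-- _go: solve a nonempty segment as if the counter started at -1; returns (pairs, non-'+' count)
def pvGoB (seg : List String) : List (Int × String) × Int :=
  match seg with
  | [] => ([], 0)   -- never reached from attach_initref_pos_alt (only nonempty segments)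
  | [p] =>
    ([((if p = "+" then (0 : Int) else 1) - 1, p)], if p = "+" then (0 : Int) else 1)
  | a :: b :: t =>
    let s := a :: b :: t
    let mid := s.length / 2
    let L := pvGoB (s.take mid)
    let R := pvGoB (s.drop mid)
    (L.1 ++ R.1.map (fun pq => (pq.1 + L.2, pq.2)), L.2 + R.2)
termination_by seg.length
decreasing_by
  · simp only [List.length_take, List.length_cons]; omega
  · simp only [List.length_drop, List.length_cons]; omega

def attach_initref_pos_alt (alnprofile : List String) : List (Int × String) :=
  match alnprofile with
  | [] => []
  | s => (pvGoB s).1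

-- ===== PRECONDITION & SPEC =====
def Spec_attach_initref_pos (alnprofile : List String) (out : List (Int × String)) : Prop := out = attach_initref_pos_alt alnprofile
instance (alnprofile : List String) (out : List (Int × String)) : Decidable (Spec_attach_initref_pos alnprofile out) := by unfold Spec_attach_initref_pos; infer_instance

-- ===== CLAIM (what is proved, stated in full; the proofs are below) =====
def Claim_equal_attach_initref_pos : Prop := ∀ (alnprofile : List String), Dom_attach_initref_pos alnprofile → Spec_attach_initref_pos alnprofile (attach_initref_pos alnprofile)

-- ===== LEMMAS AND PROOFS =====

-- recursive characterisation of A's loop body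
def pvTag (l : List String) (c : Int) : List (Int × String) :=
  match l with
  | [] => []
  | p :: t =>
    let c' : Int := if p ≠ "+" then c + 1 else c
    (c', p) :: pvTag t c'

-- count of non-'+' entries
def pvCnt (l : List String) : Int :=
  match l with
  | [] => 0
  | p :: t => (if p = "+" then 0 else 1) + pvCnt t

theorem pvA_fold (l : List String) (acc : List (Int × String)) (c : Int) :
    (l.foldl
      (fun (st : List (Int × String) × Int) p =>
        let pos0 : Int := if p ≠ "+" then st.2 + 1 else st.2
        (st.1 ++ [(pos0, p)], pos0))
      (acc, c)).1 = acc ++ pvTag l c := by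
  induction l generalizing acc c with
  | nil => simp [pvTag]
  | cons p t ih => simp only [List.foldl_cons]; rw [ih]; simp [pvTag]

theorem pvTag_shift (l : List String) (c k : Int) :
    pvTag l (c + k) = (pvTag l c).map (fun pq => (pq.1 + k, pq.2)) := by
  induction l generalizing c with
  | nil => simp [pvTag]
  | cons p t ih =>
    by_cases h : p = "+"
    · simp [pvTag, h, ih]
    · simp only [pvTag, ne_eq, h, not_false_iff, if_true, List.map_cons]
      rw [show c + k + 1 = (c + 1) + k by ring, ih]

theorem pvTag_append (l1 l2 : List String) (c : Int) :
    pvTag (l1 ++ l2) c = pvTag l1 c ++ pvTag l2 (c + pvCnt l1) := by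
  induction l1 generalizing c with
  | nil => simp [pvTag, pvCnt]
  | cons p t ih =>
    by_cases h : p = "+"
    · simp [pvTag, pvCnt, h, ih]
    · simp [pvTag, pvCnt, h, ih]
      ring_nf

theorem pvCnt_append (l1 l2 : List String) :
    pvCnt (l1 ++ l2) = pvCnt l1 + pvCnt l2 := by
  induction l1 with
  | nil => simp [pvCnt]
  | cons p t ih =>
    simp [pvCnt, ih]
    ring

theorem pvGoB_spec (l : List String) (h : l ≠ []) :
    pvGoB l = (pvTag l (-1), pvCnt l) := by
  fun_induction pvGoB l with
  | case1 => simp at h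
  | case2 p =>
    by_cases hp : p = "+" <;> simp [pvTag, pvCnt, hp]
  | case3 a b t s mid L R ih1 ih2 =>
    have hmid1 : 1 ≤ mid := by simp only [mid, s, List.length_cons]; omega
    have hmid2 : mid < (a :: b :: t).length := by
      simp only [mid, s, List.length_cons]; omega
    have htk : List.take mid (a :: b :: t) ≠ [] := by
      have hlen : (List.take mid (a :: b :: t)).length = mid := by
        simp only [List.length_take]; omega
      intro he; rw [he] at hlen; simp only [List.length_nil] at hlen; omega
    have hdr : List.drop mid (a :: b :: t) ≠ [] := by
      have hlen : (List.drop mid (a :: b :: t)).length = (a :: b :: t).length - mid := by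
        simp only [List.length_drop]
      intro he; rw [he] at hlen; simp only [List.length_nil] at hlen
      simp only [List.length_cons] at hlen hmid2; omega
    simp only [L, R, s]
    rw [ih1 htk, ih2 hdr]
    have hsplit : a :: b :: t = List.take mid (a :: b :: t) ++ List.drop mid (a :: b :: t) :=
      (List.take_append_drop _ _).symm
    conv_rhs => rw [hsplit]
    rw [pvTag_append, pvCnt_append, pvTag_shift]

-- ===== VERDICT (by name: the statement is the Claim_ definition above) =====
theorem attach_initref_pos_spec : Claim_equal_attach_initref_pos := by
  intro l _
  show _ = _
  match l with
  | [] => rfl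
  | p :: t =>
    have hg := pvGoB_spec (p :: t) (by simp)
    simp only [attach_initref_pos, attach_initref_pos_alt]
    rw [pvA_fold, hg]
    simp
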